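-- pv_equiv track=rewrite | github.com/Cons-Cat/libCat | scripts/status_link_flags.py | find_link_block
-- ===== SOURCE A (Python) =====
-- def find_link_block(lines: list[str], config: str) -> int | None:
--     targets = []
--     if config:
--         targets.extend(
--             (
--                 f"build examples/{config}/hello:",
--                 f"build tests/{config}/unit_tests:",
--             )
--         )
--     targets.extend(("build examples/hello:", "build tests/unit_tests:"))
--
--     for target in targets:
--         for index, line in enumerate(lines):
--             if line.startswith(target):
--                 return index
--     return None
-- ===== SOURCE B (Python) =====
-- def find_link_block(lines: list[str], config: str) -> int | None:
--     targets = ["build examples/hello:", "build tests/unit_tests:"]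
--     if config:
--         targets = [
--             f"build examples/{config}/hello:",
--             f"build tests/{config}/unit_tests:",
--         ] + targets
--     firsts = [None] * len(targets)
--     for index, line in enumerate(lines):
--         firsts = [
--             index if f is None and line.startswith(t) else f
--             for f, t in zip(firsts, targets)
--         ]
--     for f in firsts:
--         if f is not None:
--             return f
--     return None
-- ===== Notes on version B (the rewrite author's own statement) =====
-- stated objective: alternative
-- what changed: A makes a separate scan of lines for each target in priority order with an early return; B makes a single pass over lines maintaining, per target, the first matching line index, then picks the highest-priority recorded index afterwards.
import Mathlib
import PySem

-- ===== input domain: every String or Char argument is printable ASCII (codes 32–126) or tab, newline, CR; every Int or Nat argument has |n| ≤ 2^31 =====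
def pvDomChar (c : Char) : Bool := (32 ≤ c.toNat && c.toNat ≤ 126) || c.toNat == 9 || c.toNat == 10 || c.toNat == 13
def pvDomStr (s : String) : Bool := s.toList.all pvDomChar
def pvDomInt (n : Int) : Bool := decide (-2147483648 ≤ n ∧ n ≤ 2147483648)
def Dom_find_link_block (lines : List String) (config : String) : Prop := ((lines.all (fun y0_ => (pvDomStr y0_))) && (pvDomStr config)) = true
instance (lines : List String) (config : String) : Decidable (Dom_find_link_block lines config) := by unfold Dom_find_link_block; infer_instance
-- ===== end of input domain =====

-- B replaces A's per-target rescans of `lines` with one pass recording each target's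
-- first matching index, then a priority pick; alternative decomposition, same cost class.

-- ===== PORT A =====
-- inner `for index, line in enumerate(lines): if line.startswith(target): return index`
def pvInnerA (t : String) : List (Int × String) → Option Int
  | [] => none
  | (i, line) :: rest => if PySem.Str.startswith line t then some i else pvInnerA t rest

-- outer `for target in targets:` with early return
def pvOuterA (el : List (Int × String)) : List String → Option Int
  | [] => none
  | t :: ts =>
    match pvInnerA t el with
    | some i => some i
    | none => pvOuterA el ts

def find_link_block (lines : List String) (config : String) : Option Int :=
  let targets :=
    (if config = "" then []
     else ["build examples/" ++ config ++ "/hello:",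
           "build tests/" ++ config ++ "/unit_tests:"])
    ++ ["build examples/hello:", "build tests/unit_tests:"]
  pvOuterA (PySem.List.enumerate lines) targets

-- ===== PORT B =====
-- single pass over enumerate(lines), rebuilding `firsts` by the zip-comprehension
def pvScanB (ts : List String) : List (Int × String) → List (Option Int) → List (Option Int)
  | [], fs => fs
  | (i, line) :: rest, fs =>
      pvScanB ts rest
        ((fs.zip ts).map (fun p =>
          if p.1.isNone && PySem.Str.startswith line p.2 then some i else p.1))

-- `for f in firsts: if f is not None: return f`
def pvPickB : List (Option Int) → Option Int
  | [] => none
  | some i :: _ => some i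
  | none :: fs => pvPickB fs

def find_link_block_alt (lines : List String) (config : String) : Option Int :=
  let targets :=
    if config = "" then ["build examples/hello:", "build tests/unit_tests:"]
    else ["build examples/" ++ config ++ "/hello:",
          "build tests/" ++ config ++ "/unit_tests:"]
         ++ ["build examples/hello:", "build tests/unit_tests:"]
  pvPickB (pvScanB targets (PySem.List.enumerate lines)
            (List.replicate targets.length none))

-- ===== PRECONDITION & SPEC =====
def Spec_find_link_block (lines : List String) (config : String) (out : Option Int) : Prop := out = find_link_block_alt lines config
instance (lines : List String) (config : String) (out : Option Int) : Decidable (Spec_find_link_block lines config out) := by unfold Spec_find_link_block; infer_instance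

-- ===== CLAIM (what is proved, stated in full; the proofs are below) =====
def Claim_equal_find_link_block : Prop := ∀ (lines : List String) (config : String), Dom_find_link_block lines config → Spec_find_link_block lines config (find_link_block lines config)

-- ===== LEMMAS AND PROOFS =====

-- first-some choice, the shape shared by pvOuterA's match and option priority
def pvOr (a b : Option Int) : Option Int :=
  match a with
  | some i => some i
  | none => b

theorem pv_zip_map_zip {α β γ : Type} (fs : List α) (ts : List β) (g : α × β → γ) :
    ((fs.zip ts).map g).zip ts = (fs.zip ts).map (fun p => (g p, p.2)) := by
  induction fs generalizing ts with
  | nil => simp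
  | cons a fs ih =>
    cases ts with
    | nil => simp
    | cons b ts => simp [ih]

theorem pv_map_fst_zip_self {α β : Type} (fs : List α) (ts : List β)
    (h : fs.length = ts.length) : (fs.zip ts).map Prod.fst = fs := by
  induction fs generalizing ts with
  | nil => rfl
  | cons a fs ih =>
    cases ts with
    | nil => simp at h
    | cons b ts => simpa using ih ts (by simpa using h)

theorem pvScanB_eq (ts : List String) (el : List (Int × String)) :
    ∀ fs : List (Option Int), fs.length = ts.length →
      pvScanB ts el fs = (fs.zip ts).map (fun p => pvOr p.1 (pvInnerA p.2 el)) := by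
  induction el with
  | nil =>
    intro fs h
    have : (fs.zip ts).map (fun p => pvOr p.1 (pvInnerA p.2 [])) = (fs.zip ts).map Prod.fst := by
      apply List.map_congr_left
      intro p _
      cases p.1 <;> rfl
    simp [pvScanB, this, pv_map_fst_zip_self fs ts h]
  | cons hd rest ih =>
    intro fs h
    obtain ⟨i, line⟩ := hd
    have hlen : ((fs.zip ts).map (fun p =>
        if p.1.isNone && PySem.Str.startswith line p.2 then some i else p.1)).length = ts.length := by
      simp [h]
    have := ih _ hlen
    rw [pvScanB, this, pv_zip_map_zip, List.map_map]
    apply List.map_congr_left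
    intro p _
    cases hp : p.1 with
    | some j => simp [Function.comp, hp, pvOr]
    | none =>
      simp only [Function.comp, hp, Option.isNone_none, Bool.true_and]
      by_cases hsw : PySem.Chars.startswith line.toList p.2.toList = true <;>
        simp [hsw, pvOr, pvInnerA, PySem.Str.startswith]

theorem pv_replicate_zip {β : Type} (ts : List β) :
    (List.replicate ts.length (none : Option Int)).zip ts = ts.map (fun t => ((none : Option Int), t)) := by
  induction ts with
  | nil => rfl
  | cons t ts ih => simp [List.replicate, ih]

theorem pvPickB_map (el : List (Int × String)) (ts : List String) :
    pvPickB (ts.map (fun t => pvInnerA t el)) = pvOuterA el ts := by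
  induction ts with
  | nil => rfl
  | cons t ts ih =>
    cases h : pvInnerA t el <;> simp [pvOuterA, pvPickB, h, ih]

theorem pv_main (el : List (Int × String)) (ts : List String) :
    pvPickB (pvScanB ts el (List.replicate ts.length none)) = pvOuterA el ts := by
  rw [pvScanB_eq ts el _ (by simp), pv_replicate_zip, List.map_map]
  have : ((fun p => pvOr p.1 (pvInnerA p.2 el)) ∘ fun t => ((none : Option Int), t))
      = fun t => pvInnerA t el := by
    funext t; rfl
  rw [this, pvPickB_map]

-- ===== VERDICT (by name: the statement is the Claim_ definition above) =====
theorem find_link_block_spec : Claim_equal_find_link_block := by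
  intro lines config _
  unfold Spec_find_link_block find_link_block find_link_block_alt
  by_cases hc : config = "" <;>
    simp only [hc, if_true, if_false, reduceIte, List.nil_append, List.append_eq] <;>
    exact (pv_main _ _).symm
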